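-- pv_equiv track=rewrite | github.com/cveda/cveda_databank | cveda_databank/sanity/imaging.py | _match_series_description
-- ===== SOURCE A (Python) =====
-- _SERIES_DESCRIPTION = {
--     'CHANDIGARH': {
--         'T1w': ['3DT1 weighted volume'],
--         'rest': ['Resting state fMRI'],
--         'B0_map': ['B0 mapping'],
--         'dwi': ['DTI'],
--         'dwi_rev': ['DTI-reversed'],
--         'FLAIR': ['2D fast FLAIR'],
--         'T2w': ['2D T2 weighted'],
--     },
--     'MYSURU_pilot5': {
--         'T1w': ['sT1W_3D_TFE'],
--         'rest': ['FE_EPI 160'],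
--         'B0_map': ['B0 mapping'],
--         'dwi': ['DTI_high_32'],
--         'dwi_rev': ['DTI (reversed)'],
--         'FLAIR': ['FLAIR'],
--         'T2w': ['T2W_TSE'],
--     },
--     'MYSURU_pilot4': {
--         'T1w': ['3D T1W'],
--         'rest': ['RESTING STATE'],
--         'B0_map': ['B0 mapping'],
--         'dwi': ['DTI_high_32'],
--         'dwi_rev': ['DTI_high_6'],
--         'FLAIR': ['FLAIR'],
--         'T2w': ['T2W'],
--     },
--     'MYSURU_pilot3': {
--         'T1w': ['sT1W_3D_TFE'],
--         'rest': ['FE_EPI 160'],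
--         'B0_map': ['B0 mapping'],
--         'dwi': ['DTI_high_32'],
--         'dwi_rev': ['DTI_6'],
--         'FLAIR': ['FLAIR'],
--         'T2w': ['T2W_TSE'],
--     },
--     'NIMHANS': {
--         'T1w': ['3D T1 WEIGHTED VOLUME', '3D T1 WEIGHTED VOLUME_2'],
--         'rest': ['act_RESTING STATE fMRI', 'act_Resting state fMRI'],
--         'B0_map': ['B0 MAPPING', 'B 0  MAPPING'],
--         'dwi': ['DTI_DFC', 'DTI_DFC_MIX', 'DTI _30_DFC_MIX'],
--         'dwi_rev': ['DTI REVERSED_DFC', 'DTI REVERSED_DFC_MIX', 'DTI _6_DFC_MIX'],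
--         'FLAIR': ['2D FAST FLAIR'],
--         'T2w': ['2D T2 WEIGHTED'],
--     },
--     'NIMHANS_pilot': {
--         'T1w': ['t1_mprage_sag'],
--         'rest': ['bas_Resting STATE fMRI'],
--         'B0_map': ['B 0 _mapping_2mm'],
--         'dwi': ['DTI _30_DFC'],
--         'dwi_rev': ['DTI _6_DFC'],
--         'FLAIR': ['2D FLAIR'],
--         'T2w': ['2D T2 TSE'],
--     },
-- }
--
-- def _match_series_description(sequence, series_description, center=None):
--     _SHORT_SERIES_DESCRIPTION = {}
--
--     if center:
--         if center in _SHORT_SERIES_DESCRIPTION: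
--             series = _SHORT_SERIES_DESCRIPTION[center]
--             if sequence in series and series_description in series[sequence]:
--                 return True
--     else:
--         for series in _SERIES_DESCRIPTION.values():
--             if sequence in series and series_description in series[sequence]:
--                 return True
--     return False
-- ===== SOURCE B (Python) =====
-- # Precomputed flat lookup table: sequence -> set of every series description
-- # known for that sequence, across all centers of the acquisition protocol.
-- _DESCRIPTION_INDEX = {
--     'T1w': {'3DT1 weighted volume', 'sT1W_3D_TFE', '3D T1W',
--             '3D T1 WEIGHTED VOLUME', '3D T1 WEIGHTED VOLUME_2', 't1_mprage_sag'},
--     'rest': {'Resting state fMRI', 'FE_EPI 160', 'RESTING STATE',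
--              'act_RESTING STATE fMRI', 'act_Resting state fMRI',
--              'bas_Resting STATE fMRI'},
--     'B0_map': {'B0 mapping', 'B0 MAPPING', 'B 0  MAPPING', 'B 0 _mapping_2mm'},
--     'dwi': {'DTI', 'DTI_high_32', 'DTI_DFC', 'DTI_DFC_MIX',
--             'DTI _30_DFC_MIX', 'DTI _30_DFC'},
--     'dwi_rev': {'DTI-reversed', 'DTI (reversed)', 'DTI_high_6', 'DTI_6',
--                 'DTI REVERSED_DFC', 'DTI REVERSED_DFC_MIX',
--                 'DTI _6_DFC_MIX', 'DTI _6_DFC'},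
--     'FLAIR': {'2D fast FLAIR', 'FLAIR', '2D FAST FLAIR', '2D FLAIR'},
--     'T2w': {'2D T2 weighted', 'T2W_TSE', 'T2W', '2D T2 WEIGHTED', '2D T2 TSE'},
-- }
--
-- # No center uses short series descriptions (yet).
-- _SHORT_SERIES_DESCRIPTION = {}
--
--
-- def _match_series_description(sequence, series_description, center=None):
--     if center:
--         series = _SHORT_SERIES_DESCRIPTION.get(center, {})
--         return series_description in series.get(sequence, ())
--     return series_description in _DESCRIPTION_INDEX.get(sequence, ())
-- ===== Notes on version B (the rewrite author's own statement) =====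
-- stated objective: alternative
-- what changed: B replaces A's runtime loop over the per-center nested dicts with a single membership test in a precomputed flat module-level table (sequence -> set of all known descriptions), and the truthy-center branch becomes two defaulted dict lookups instead of A's membership-guarded indexing chain.
import Mathlib
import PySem

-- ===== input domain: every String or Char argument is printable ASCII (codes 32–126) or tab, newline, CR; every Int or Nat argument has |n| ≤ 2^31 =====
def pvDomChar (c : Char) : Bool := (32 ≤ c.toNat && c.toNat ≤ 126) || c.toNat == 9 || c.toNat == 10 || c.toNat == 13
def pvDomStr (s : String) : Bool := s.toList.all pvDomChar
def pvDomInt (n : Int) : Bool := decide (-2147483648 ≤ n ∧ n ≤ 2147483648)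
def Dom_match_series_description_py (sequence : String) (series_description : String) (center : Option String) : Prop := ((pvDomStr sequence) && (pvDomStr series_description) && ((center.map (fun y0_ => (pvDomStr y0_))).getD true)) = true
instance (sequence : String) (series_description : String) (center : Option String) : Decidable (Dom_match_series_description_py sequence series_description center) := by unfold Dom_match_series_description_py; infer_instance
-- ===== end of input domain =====

-- B replaces A's runtime scan over the per-center nested tables with one membership test
-- against a precomputed flat sequence → set-of-descriptions table (return value only).

-- ===== PORT A =====
-- the shared module constant _SERIES_DESCRIPTION (a dict of dicts)
def pvSeriesDescription : PySem.Dict String (PySem.Dict String (List String)) :=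
  PySem.Dict.mk [
    ("CHANDIGARH", PySem.Dict.mk [
      ("T1w", ["3DT1 weighted volume"]),
      ("rest", ["Resting state fMRI"]),
      ("B0_map", ["B0 mapping"]),
      ("dwi", ["DTI"]),
      ("dwi_rev", ["DTI-reversed"]),
      ("FLAIR", ["2D fast FLAIR"]),
      ("T2w", ["2D T2 weighted"])]),
    ("MYSURU_pilot5", PySem.Dict.mk [
      ("T1w", ["sT1W_3D_TFE"]),
      ("rest", ["FE_EPI 160"]),
      ("B0_map", ["B0 mapping"]),
      ("dwi", ["DTI_high_32"]),
      ("dwi_rev", ["DTI (reversed)"]),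
      ("FLAIR", ["FLAIR"]),
      ("T2w", ["T2W_TSE"])]),
    ("MYSURU_pilot4", PySem.Dict.mk [
      ("T1w", ["3D T1W"]),
      ("rest", ["RESTING STATE"]),
      ("B0_map", ["B0 mapping"]),
      ("dwi", ["DTI_high_32"]),
      ("dwi_rev", ["DTI_high_6"]),
      ("FLAIR", ["FLAIR"]),
      ("T2w", ["T2W"])]),
    ("MYSURU_pilot3", PySem.Dict.mk [
      ("T1w", ["sT1W_3D_TFE"]),
      ("rest", ["FE_EPI 160"]),
      ("B0_map", ["B0 mapping"]),
      ("dwi", ["DTI_high_32"]),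
      ("dwi_rev", ["DTI_6"]),
      ("FLAIR", ["FLAIR"]),
      ("T2w", ["T2W_TSE"])]),
    ("NIMHANS", PySem.Dict.mk [
      ("T1w", ["3D T1 WEIGHTED VOLUME", "3D T1 WEIGHTED VOLUME_2"]),
      ("rest", ["act_RESTING STATE fMRI", "act_Resting state fMRI"]),
      ("B0_map", ["B0 MAPPING", "B 0  MAPPING"]),
      ("dwi", ["DTI_DFC", "DTI_DFC_MIX", "DTI _30_DFC_MIX"]),
      ("dwi_rev", ["DTI REVERSED_DFC", "DTI REVERSED_DFC_MIX", "DTI _6_DFC_MIX"]),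
      ("FLAIR", ["2D FAST FLAIR"]),
      ("T2w", ["2D T2 WEIGHTED"])]),
    ("NIMHANS_pilot", PySem.Dict.mk [
      ("T1w", ["t1_mprage_sag"]),
      ("rest", ["bas_Resting STATE fMRI"]),
      ("B0_map", ["B 0 _mapping_2mm"]),
      ("dwi", ["DTI _30_DFC"]),
      ("dwi_rev", ["DTI _6_DFC"]),
      ("FLAIR", ["2D FLAIR"]),
      ("T2w", ["2D T2 TSE"])])]

-- `sequence in series and series_description in series[sequence]`
def pvSeriesHit (series : PySem.Dict String (List String)) (sequence series_description : String) : Bool :=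
  series.contains sequence && (series.getD sequence []).contains series_description

def match_series_description_py (sequence : String) (series_description : String) (center : Option String) : Bool :=
  let shortSeriesDescription : PySem.Dict String (PySem.Dict String (List String)) := PySem.Dict.empty
  -- `if center:` — truthy iff center is a non-empty string
  match center with
  | some c =>
    if c ≠ "" then
      if shortSeriesDescription.contains c then
        match shortSeriesDescription.get? c with
        | some series => if pvSeriesHit series sequence series_description then true else false
        | none => false
      else false
    else
      -- falsy center (''): the for-loop branch
      pvSeriesDescription.values.any (fun series => pvSeriesHit series sequence series_description)
  | none =>
      pvSeriesDescription.values.any (fun series => pvSeriesHit series sequence series_description)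

-- ===== PORT B =====
-- the precomputed module constant _DESCRIPTION_INDEX of Source B
def pvDescriptionIndex : PySem.Dict String (PySem.Set String) :=
  PySem.Dict.mk [
    ("T1w", ["3DT1 weighted volume", "sT1W_3D_TFE", "3D T1W", "3D T1 WEIGHTED VOLUME",
             "3D T1 WEIGHTED VOLUME_2", "t1_mprage_sag"]),
    ("rest", ["Resting state fMRI", "FE_EPI 160", "RESTING STATE", "act_RESTING STATE fMRI",
              "act_Resting state fMRI", "bas_Resting STATE fMRI"]),
    ("B0_map", ["B0 mapping", "B0 MAPPING", "B 0  MAPPING", "B 0 _mapping_2mm"]),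
    ("dwi", ["DTI", "DTI_high_32", "DTI_DFC", "DTI_DFC_MIX", "DTI _30_DFC_MIX", "DTI _30_DFC"]),
    ("dwi_rev", ["DTI-reversed", "DTI (reversed)", "DTI_high_6", "DTI_6", "DTI REVERSED_DFC",
                 "DTI REVERSED_DFC_MIX", "DTI _6_DFC_MIX", "DTI _6_DFC"]),
    ("FLAIR", ["2D fast FLAIR", "FLAIR", "2D FAST FLAIR", "2D FLAIR"]),
    ("T2w", ["2D T2 weighted", "T2W_TSE", "T2W", "2D T2 WEIGHTED", "2D T2 TSE"])]

-- the module constant _SHORT_SERIES_DESCRIPTION of Source B (empty)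
def pvShortSeriesDescription : PySem.Dict String (PySem.Dict String (List String)) :=
  PySem.Dict.empty

def match_series_description_py_alt (sequence : String) (series_description : String) (center : Option String) : Bool :=
  match center with
  | some c =>
    if c ≠ "" then
      -- series = _SHORT_SERIES_DESCRIPTION.get(center, {}); series.get(sequence, ())
      ((pvShortSeriesDescription.getD c PySem.Dict.empty).getD sequence []).contains series_description
    else
      PySem.Set.contains (pvDescriptionIndex.getD sequence PySem.Set.empty) series_description
  | none =>
      PySem.Set.contains (pvDescriptionIndex.getD sequence PySem.Set.empty) series_description

-- ===== PRECONDITION & SPEC =====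
def Spec_match_series_description_py (sequence : String) (series_description : String) (center : Option String) (out : Bool) : Prop := out = match_series_description_py_alt sequence series_description center
instance (sequence : String) (series_description : String) (center : Option String) (out : Bool) : Decidable (Spec_match_series_description_py sequence series_description center out) := by unfold Spec_match_series_description_py; infer_instance

-- ===== CLAIM (what is proved, stated in full; the proofs are below) =====
def Claim_equal_match_series_description_py : Prop := ∀ (sequence : String) (series_description : String) (center : Option String), Dom_match_series_description_py sequence series_description center → Spec_match_series_description_py sequence series_description center (match_series_description_py sequence series_description center)

-- ===== LEMMAS AND PROOFS =====
-- all descriptions the A-loop tests for a given sequence, in loop order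
def pvFlatAt (seq : String) : List String :=
  (pvSeriesDescription.values.map (fun s => s.getD seq [])).flatten

theorem pv_hit_drop_guard (d : PySem.Dict String (List String)) (k x : String) :
    pvSeriesHit d k x = (d.getD k []).contains x := by
  unfold pvSeriesHit
  cases hc : d.contains k
  · simp only [Bool.false_and]
    simp only [PySem.Dict.getD, PySem.Dict.contains, PySem.Dict.get?] at *
    cases hf : d.items.find? (fun p => p.1 == k)
    · simp
    · have hm := List.mem_of_find?_eq_some hf
      have hp := List.find?_some hf
      simp at hp hc
      exact absurd hp (hc _ _ hm)
  · simp

theorem pv_any_eq_flat (seq x : String) :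
    pvSeriesDescription.values.any (fun series => pvSeriesHit series seq x)
      = (pvFlatAt seq).contains x := by
  unfold pvFlatAt
  rw [Bool.eq_iff_iff]
  simp [pv_hit_drop_guard, List.mem_flatten]

theorem pv_loop_eq_index (sequence series_description : String) :
    pvSeriesDescription.values.any (fun series => pvSeriesHit series sequence series_description)
      = PySem.Set.contains (pvDescriptionIndex.getD sequence PySem.Set.empty) series_description := by
  rw [pv_any_eq_flat]
  by_cases h1 : sequence = "T1w"
  · subst h1
    rw [show pvFlatAt "T1w" = ["3DT1 weighted volume", "sT1W_3D_TFE", "3D T1W", "sT1W_3D_TFE",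
          "3D T1 WEIGHTED VOLUME", "3D T1 WEIGHTED VOLUME_2", "t1_mprage_sag"] from by decide,
        show pvDescriptionIndex.getD "T1w" PySem.Set.empty = ["3DT1 weighted volume", "sT1W_3D_TFE",
          "3D T1W", "3D T1 WEIGHTED VOLUME", "3D T1 WEIGHTED VOLUME_2", "t1_mprage_sag"] from by decide]
    rw [Bool.eq_iff_iff]; simp [PySem.Set.contains]; tauto
  by_cases h2 : sequence = "rest"
  · subst h2
    rw [show pvFlatAt "rest" = ["Resting state fMRI", "FE_EPI 160", "RESTING STATE", "FE_EPI 160",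
          "act_RESTING STATE fMRI", "act_Resting state fMRI", "bas_Resting STATE fMRI"] from by decide,
        show pvDescriptionIndex.getD "rest" PySem.Set.empty = ["Resting state fMRI", "FE_EPI 160",
          "RESTING STATE", "act_RESTING STATE fMRI", "act_Resting state fMRI",
          "bas_Resting STATE fMRI"] from by decide]
    rw [Bool.eq_iff_iff]; simp [PySem.Set.contains]; tauto
  by_cases h3 : sequence = "B0_map"
  · subst h3
    rw [show pvFlatAt "B0_map" = ["B0 mapping", "B0 mapping", "B0 mapping", "B0 mapping",
          "B0 MAPPING", "B 0  MAPPING", "B 0 _mapping_2mm"] from by decide,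
        show pvDescriptionIndex.getD "B0_map" PySem.Set.empty = ["B0 mapping", "B0 MAPPING",
          "B 0  MAPPING", "B 0 _mapping_2mm"] from by decide]
    rw [Bool.eq_iff_iff]; simp [PySem.Set.contains]
  by_cases h4 : sequence = "dwi"
  · subst h4
    rw [show pvFlatAt "dwi" = ["DTI", "DTI_high_32", "DTI_high_32", "DTI_high_32", "DTI_DFC",
          "DTI_DFC_MIX", "DTI _30_DFC_MIX", "DTI _30_DFC"] from by decide,
        show pvDescriptionIndex.getD "dwi" PySem.Set.empty = ["DTI", "DTI_high_32", "DTI_DFC",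
          "DTI_DFC_MIX", "DTI _30_DFC_MIX", "DTI _30_DFC"] from by decide]
    rw [Bool.eq_iff_iff]; simp [PySem.Set.contains]
  by_cases h5 : sequence = "dwi_rev"
  · subst h5
    rw [show pvFlatAt "dwi_rev" = ["DTI-reversed", "DTI (reversed)", "DTI_high_6", "DTI_6",
          "DTI REVERSED_DFC", "DTI REVERSED_DFC_MIX", "DTI _6_DFC_MIX", "DTI _6_DFC"] from by decide,
        show pvDescriptionIndex.getD "dwi_rev" PySem.Set.empty = ["DTI-reversed", "DTI (reversed)",
          "DTI_high_6", "DTI_6", "DTI REVERSED_DFC", "DTI REVERSED_DFC_MIX", "DTI _6_DFC_MIX",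
          "DTI _6_DFC"] from by decide]
    rw [Bool.eq_iff_iff]; simp [PySem.Set.contains]
  by_cases h6 : sequence = "FLAIR"
  · subst h6
    rw [show pvFlatAt "FLAIR" = ["2D fast FLAIR", "FLAIR", "FLAIR", "FLAIR", "2D FAST FLAIR",
          "2D FLAIR"] from by decide,
        show pvDescriptionIndex.getD "FLAIR" PySem.Set.empty = ["2D fast FLAIR", "FLAIR",
          "2D FAST FLAIR", "2D FLAIR"] from by decide]
    rw [Bool.eq_iff_iff]; simp [PySem.Set.contains]
  by_cases h7 : sequence = "T2w"
  · subst h7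
    rw [show pvFlatAt "T2w" = ["2D T2 weighted", "T2W_TSE", "T2W", "T2W_TSE", "2D T2 WEIGHTED",
          "2D T2 TSE"] from by decide,
        show pvDescriptionIndex.getD "T2w" PySem.Set.empty = ["2D T2 weighted", "T2W_TSE", "T2W",
          "2D T2 WEIGHTED", "2D T2 TSE"] from by decide]
    rw [Bool.eq_iff_iff]; simp [PySem.Set.contains]; tauto
  · -- sequence is not a key of any center's table: both sides are false
    rw [Bool.eq_iff_iff]
    simp [pvFlatAt, pvSeriesDescription, pvDescriptionIndex, PySem.Dict.getD, PySem.Dict.get?,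
          PySem.Dict.values, PySem.Set.contains, Ne.symm h1, Ne.symm h2, Ne.symm h3,
          Ne.symm h4, Ne.symm h5, Ne.symm h6, Ne.symm h7]

-- ===== VERDICT (by name: the statement is the Claim_ definition above) =====
theorem match_series_description_py_spec : Claim_equal_match_series_description_py := by
  intro sequence series_description center _
  unfold Spec_match_series_description_py
  match center with
  | none =>
    simpa [match_series_description_py, match_series_description_py_alt] using
      (pv_loop_eq_index sequence series_description)
  | some c =>
    by_cases hc : c = ""
    · subst hc
      simpa [match_series_description_py, match_series_description_py_alt] using
        (pv_loop_eq_index sequence series_description)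
    · simp [match_series_description_py, match_series_description_py_alt, hc,
            pvShortSeriesDescription, PySem.Dict.empty, PySem.Dict.get?, PySem.Dict.getD]
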